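-- pv_equiv track=rewrite | github.com/AditiSurabhi123/AI-Shopping-Experience-Claire-Face-Personalization | backend/recommend.py | _boost_face_shape
-- ===== SOURCE A (Python) =====
-- def _boost_face_shape(products: list, face_shape: str) -> list:
--     """
--     Face-scan PLP ordering: push products whose `face_shape_recommendation`
--     lists the user's detected face shape to the top. Stable sort so the LLM
--     order is preserved among equally-good matches.
--     """
--     if not face_shape or not products:
--         return products
--     fs = face_shape.lower()
--     def _score(p):
--         recs = [str(r).lower() for r in (p.get("face_shape_recommendation")
--                                          or p.get("shape_suitability") or [])]
--         # Primary: exact match for the user's face shape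
--         primary = 1 if fs in recs else 0
--         # Secondary: any face-shape suggestion at all (small tie-breaker)
--         any_rec  = 1 if recs else 0
--         return (-primary, -any_rec)
--     return sorted(products, key=_score)
-- ===== SOURCE B (Python) =====
-- def _boost_face_shape(products: list, face_shape: str) -> list:
--     """One-pass bucketing: the sort key takes only three values, so partition
--     the products into three order-preserving buckets and concatenate (no sort)."""
--     if not face_shape or not products:
--         return products
--     fs = face_shape.lower()
--     exact, partial, rest = [], [], []
--     for p in products:
--         recs = [str(r).lower() for r in (p.get("face_shape_recommendation")
--                                          or p.get("shape_suitability") or [])]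
--         if fs in recs:
--             exact.append(p)
--         elif recs:
--             partial.append(p)
--         else:
--             rest.append(p)
--     return exact + partial + rest
-- ===== Notes on version B (the rewrite author's own statement) =====
-- stated objective: alternative
-- what changed: Replaced the key-based stable sort with a single pass that partitions products into three order-preserving buckets (exact face-shape match, any recommendation, none) and concatenates them, since the sort key takes only three values.
import Mathlib
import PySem

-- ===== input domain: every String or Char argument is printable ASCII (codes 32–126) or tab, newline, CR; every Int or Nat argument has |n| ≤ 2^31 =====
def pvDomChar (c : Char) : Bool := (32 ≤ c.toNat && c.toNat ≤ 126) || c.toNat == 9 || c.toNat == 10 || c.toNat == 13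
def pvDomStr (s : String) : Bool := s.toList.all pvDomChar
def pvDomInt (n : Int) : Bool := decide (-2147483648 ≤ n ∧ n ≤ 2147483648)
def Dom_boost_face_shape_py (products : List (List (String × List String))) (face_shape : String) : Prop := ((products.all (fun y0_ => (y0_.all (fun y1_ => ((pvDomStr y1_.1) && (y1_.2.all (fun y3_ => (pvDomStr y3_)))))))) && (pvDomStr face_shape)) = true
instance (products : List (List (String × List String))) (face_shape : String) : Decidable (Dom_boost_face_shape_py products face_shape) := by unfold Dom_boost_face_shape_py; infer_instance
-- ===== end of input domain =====

-- B replaces the stable sort by a one-pass three-bucket partition and concatenation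
-- (the sort key takes only three values), a structurally different algorithm of similar cost.

-- ===== PORT A =====
-- `x or y` on list-valued options: a present, NON-EMPTY list is truthy, otherwise fall through
def pvOrList (o : Option (List String)) (d : List String) : List String :=
  match o with
  | some l => if l.isEmpty then d else l
  | none => d

-- recs = [str(r).lower() for r in (p.get("face_shape_recommendation") or p.get("shape_suitability") or [])]
def pvRecs (p : List (String × List String)) : List String :=
  (pvOrList (PySem.Dict.get? (PySem.Dict.mk p) "face_shape_recommendation")
    (pvOrList (PySem.Dict.get? (PySem.Dict.mk p) "shape_suitability") [])).map PySem.Str.lower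

def boost_face_shape_py (products : List (List (String × List String))) (face_shape : String) : List (List (String × List String)) :=
  if face_shape = "" ∨ products = [] then products
  else
    let fs := PySem.Str.lower face_shape
    -- key = (-primary, -any_rec), stable sort
    PySem.List.sorted2 products
      (fun p => -(if fs ∈ pvRecs p then (1 : Int) else 0))
      (fun p => -(if (pvRecs p).isEmpty then (0 : Int) else 1))

-- ===== PORT B =====
def boost_face_shape_py_alt (products : List (List (String × List String))) (face_shape : String) : List (List (String × List String)) :=
  if face_shape = "" ∨ products = [] then products
  else
    let fs := PySem.Str.lower face_shape
    let t := products.foldl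
      (fun (acc : List (List (String × List String)) × List (List (String × List String)) × List (List (String × List String))) p =>
        let recs := pvRecs p
        if fs ∈ recs then (acc.1 ++ [p], acc.2.1, acc.2.2)
        else if ¬ recs.isEmpty then (acc.1, acc.2.1 ++ [p], acc.2.2)
        else (acc.1, acc.2.1, acc.2.2 ++ [p]))
      ([], [], [])
    t.1 ++ t.2.1 ++ t.2.2

-- ===== PRECONDITION & SPEC =====
def Spec_boost_face_shape_py (products : List (List (String × List String))) (face_shape : String) (out : List (List (String × List String))) : Prop := out = boost_face_shape_py_alt products face_shape
instance (products : List (List (String × List String))) (face_shape : String) (out : List (List (String × List String))) : Decidable (Spec_boost_face_shape_py products face_shape out) := by unfold Spec_boost_face_shape_py; infer_instance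

-- ===== CLAIM (what is proved, stated in full; the proofs are below) =====
def Claim_equal_boost_face_shape_py : Prop := ∀ (products : List (List (String × List String))) (face_shape : String), Dom_boost_face_shape_py products face_shape → Spec_boost_face_shape_py products face_shape (boost_face_shape_py products face_shape)

-- ===== LEMMAS AND PROOFS =====

-- the three-valued score of a product: 0 = exact match, 1 = some recommendation, 2 = none
def pvScore (fs : String) (p : List (String × List String)) : Nat :=
  if fs ∈ pvRecs p then 0 else if (pvRecs p).isEmpty then 2 else 1

theorem pvScore_lt (fs : String) (a b : List (String × List String)) :
    (decide ((-(if fs ∈ pvRecs a then (1:Int) else 0)) < (-(if fs ∈ pvRecs b then (1:Int) else 0))) ||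
      (!decide ((-(if fs ∈ pvRecs b then (1:Int) else 0)) < (-(if fs ∈ pvRecs a then (1:Int) else 0))) &&
        decide ((-(if (pvRecs a).isEmpty then (0:Int) else 1)) < (-(if (pvRecs b).isEmpty then (0:Int) else 1)))))
    = decide (pvScore fs a < pvScore fs b) := by
  unfold pvScore
  have ha : fs ∈ pvRecs a → ¬ (pvRecs a).isEmpty = true := by
    intro h hemp; rw [List.isEmpty_iff] at hemp; simp [hemp] at h
  have hb : fs ∈ pvRecs b → ¬ (pvRecs b).isEmpty = true := by
    intro h hemp; rw [List.isEmpty_iff] at hemp; simp [hemp] at h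
  by_cases h1 : fs ∈ pvRecs a <;> by_cases h2 : fs ∈ pvRecs b <;>
    by_cases h3 : (pvRecs a).isEmpty <;> by_cases h4 : (pvRecs b).isEmpty <;>
    first
      | exact absurd h3 (ha h1)
      | exact absurd h4 (hb h2)
      | simp [h1, h2, h3, h4]

theorem pv_insertBy_sandwich {α : Type} (before : α → α → Bool) (x : α)
    (L1 L2 : List α) (h1 : ∀ y ∈ L1, before x y = false) (h2 : ∀ y ∈ L2, before x y = true) :
    PySem.List.insertBy before x (L1 ++ L2) = L1 ++ x :: L2 := by
  induction L1 with
  | nil =>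
    cases L2 with
    | nil => simp [PySem.List.insertBy]
    | cons z zs => simp [PySem.List.insertBy, h2 z (by simp)]
  | cons y ys ih =>
    simp only [List.cons_append, PySem.List.insertBy, h1 y (by simp)]
    simp only [Bool.false_eq_true, if_false]
    rw [ih (fun z hz => h1 z (by simp [hz])) ]

-- the insertion-sort fold over a 3-valued score keeps the accumulator in bucket form
theorem pv_foldl_insertBy_buckets (fs : String)
    (before : List (String × List String) → List (String × List String) → Bool)
    (hbefore : ∀ a b, before a b = decide (pvScore fs a < pvScore fs b))
    (xs A0 A1 A2 : List (List (String × List String)))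
    (h0 : ∀ y ∈ A0, pvScore fs y = 0) (h1 : ∀ y ∈ A1, pvScore fs y = 1)
    (h2 : ∀ y ∈ A2, pvScore fs y = 2) :
    xs.foldl (fun acc x => PySem.List.insertBy before x acc) (A0 ++ A1 ++ A2)
    = (A0 ++ xs.filter (fun p => pvScore fs p == 0)) ++
      (A1 ++ xs.filter (fun p => pvScore fs p == 1)) ++
      (A2 ++ xs.filter (fun p => pvScore fs p == 2)) := by
  induction xs generalizing A0 A1 A2 with
  | nil => simp
  | cons x xs ih =>
    simp only [List.foldl_cons]
    have hsx : pvScore fs x = 0 ∨ pvScore fs x = 1 ∨ pvScore fs x = 2 := by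
      unfold pvScore; split_ifs <;> simp
    rcases hsx with hs | hs | hs
    · have hins : PySem.List.insertBy before x (A0 ++ A1 ++ A2) = (A0 ++ [x]) ++ A1 ++ A2 := by
        rw [List.append_assoc, pv_insertBy_sandwich before x A0 (A1 ++ A2)
          (fun y hy => by rw [hbefore]; simp [h0 y hy, hs])
          (fun y hy => by
            rw [hbefore]; rcases List.mem_append.mp hy with h | h
            · simp [h1 y h, hs]
            · simp [h2 y h, hs])]
        simp
      rw [hins, ih (A0 ++ [x]) A1 A2
        (fun y hy => by rcases List.mem_append.mp hy with h | h
                        · exact h0 y h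
                        · simp at h; subst h; exact hs) h1 h2]
      simp [hs]
    · have hins : PySem.List.insertBy before x (A0 ++ A1 ++ A2) = A0 ++ (A1 ++ [x]) ++ A2 := by
        rw [List.append_assoc, ← List.append_assoc A0 A1 A2]
        rw [pv_insertBy_sandwich before x (A0 ++ A1) A2
          (fun y hy => by
            rw [hbefore]; rcases List.mem_append.mp hy with h | h
            · simp [h0 y h, hs]
            · simp [h1 y h, hs])
          (fun y hy => by rw [hbefore]; simp [h2 y hy, hs])]
        simp
      rw [hins, ih A0 (A1 ++ [x]) A2 h0
        (fun y hy => by rcases List.mem_append.mp hy with h | h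
                        · exact h1 y h
                        · simp at h; subst h; exact hs) h2]
      simp [hs]
    · have hins : PySem.List.insertBy before x (A0 ++ A1 ++ A2) = A0 ++ A1 ++ (A2 ++ [x]) := by
        have := pv_insertBy_sandwich before x ((A0 ++ A1) ++ A2) []
          (fun y hy => by
            rw [hbefore]
            rcases List.mem_append.mp hy with h | h
            · rcases List.mem_append.mp h with h' | h'
              · simp [h0 y h', hs]
              · simp [h1 y h', hs]
            · simp [h2 y h, hs])
          (fun y hy => by simp at hy)
        simpa using this
      rw [hins, ih A0 A1 (A2 ++ [x]) h0 h1
        (fun y hy => by rcases List.mem_append.mp hy with h | h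
                        · exact h2 y h
                        · simp at h; subst h; exact hs)]
      simp [hs]

-- B's bucketing fold computes the same three filters
theorem pv_foldl_buckets_alt (fs : String)
    (xs A0 A1 A2 : List (List (String × List String))) :
    xs.foldl
      (fun (acc : List (List (String × List String)) × List (List (String × List String)) × List (List (String × List String))) p =>
        let recs := pvRecs p
        if fs ∈ recs then (acc.1 ++ [p], acc.2.1, acc.2.2)
        else if ¬ recs.isEmpty then (acc.1, acc.2.1 ++ [p], acc.2.2)
        else (acc.1, acc.2.1, acc.2.2 ++ [p]))
      (A0, A1, A2)
    = (A0 ++ xs.filter (fun p => pvScore fs p == 0),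
       A1 ++ xs.filter (fun p => pvScore fs p == 1),
       A2 ++ xs.filter (fun p => pvScore fs p == 2)) := by
  induction xs generalizing A0 A1 A2 with
  | nil => simp
  | cons x xs ih =>
    simp only [List.foldl_cons, List.filter_cons]
    by_cases hm : fs ∈ pvRecs x
    · simp only [hm, if_true, ih]
      simp [pvScore, hm]
    · by_cases he : (pvRecs x).isEmpty
      · simp only [hm, he, if_false, not_true, ih]
        simp [pvScore, hm, he]
      · simp only [hm, he, if_false, ih]
        simp [pvScore, hm, he]

-- ===== VERDICT (by name: the statement is the Claim_ definition above) =====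
theorem boost_face_shape_py_spec : Claim_equal_boost_face_shape_py := by
  intro products face_shape _
  unfold Spec_boost_face_shape_py boost_face_shape_py boost_face_shape_py_alt
  by_cases hguard : face_shape = "" ∨ products = []
  · simp [hguard]
  · simp only [hguard, if_false]
    rw [PySem.List.sorted2]
    simp only [Bool.false_eq_true, if_false]
    have hA := pv_foldl_insertBy_buckets (PySem.Str.lower face_shape) _
      (fun a b => pvScore_lt (PySem.Str.lower face_shape) a b) products [] [] []
      (by simp) (by simp) (by simp)
    simp only [List.nil_append, List.append_nil] at hA
    rw [hA, pv_foldl_buckets_alt (PySem.Str.lower face_shape) products [] [] []]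
    simp
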